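-- pv_equiv track=rewrite | github.com/coraallencoleman/pythonExercises | laceStrings.py | laceStrings
-- ===== SOURCE A (Python) =====
-- def laceStrings(s1, s2):
--     """
--     s1 and s2 are strings.
--
--     Returns a new str with elements of s1 and s2 interlaced,
--     beginning with s1. If strings are not of same length,
--     then the extra elements should appear at the end.
--     """
--     #if len(s1) < len(s2):
--     #    for item in range(len(s1)):
--     newStr = ''
--     if len(s1) == len(s2):
--         for item in range(len(s1)):
--             newStr += s1[item] + s2[item]
--         return newStr
--     elif len(s1) > len(s2):
--         for item in range(len(s2)):
--             newStr += s1[item] + s2[item]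
--         newStr += s1[len(s2):]
--         return newStr
--     elif len(s1) < len(s2):
--         for item in range(len(s1)):
--             newStr += s1[item] + s2[item]
--         newStr += s2[len(s1):]
--         return newStr
-- ===== SOURCE B (Python) =====
-- def laceStrings(s1, s2):
--     n1, n2 = len(s1), len(s2)
--     m = n1 if n1 < n2 else n2
--
--     def pick(k):
--         # output position k: interlaced zone pairs position 2i/2i+1 with s1[i]/s2[i];
--         # beyond it, k lands in the longer string's tail at offset k - len(other).
--         if k < 2 * m:
--             return s1[k // 2] if k % 2 == 0 else s2[k // 2]
--         return s1[k - n2] if n2 <= n1 else s2[k - n1]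
--
--     return ''.join([pick(k) for k in range(n1 + n2)])
-- ===== Notes on version B (the rewrite author's own statement) =====
-- stated objective: alternative
-- what changed: Instead of accumulating the result by walking the inputs (A's three branch-specific loops plus a leftover append), B computes each OUTPUT character directly from its output position: one pass over range(len(s1)+len(s2)) where position k maps by index arithmetic to s1[k//2]/s2[k//2] in the interlaced zone or into the longer string's tail at k-len(other).
import Mathlib
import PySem

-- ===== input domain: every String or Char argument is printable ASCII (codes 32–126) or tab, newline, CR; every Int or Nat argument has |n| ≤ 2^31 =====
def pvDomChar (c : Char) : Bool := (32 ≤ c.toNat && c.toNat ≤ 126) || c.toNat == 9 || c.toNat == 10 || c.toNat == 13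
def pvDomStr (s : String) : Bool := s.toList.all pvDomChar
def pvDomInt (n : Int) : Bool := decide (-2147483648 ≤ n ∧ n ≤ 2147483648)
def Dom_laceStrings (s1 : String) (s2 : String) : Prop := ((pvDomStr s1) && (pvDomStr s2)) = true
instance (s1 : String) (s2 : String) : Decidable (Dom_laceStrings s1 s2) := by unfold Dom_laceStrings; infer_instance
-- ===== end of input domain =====

-- B computes each output character directly from its output position by index arithmetic
-- (one pass over the output index range), instead of A's three input-walking accumulation loops (objective: alternative).

-- ===== PORT A =====
-- the loop 'for item in range(k): newStr += s1[item] + s2[item]' (indices are in range on every call site)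
def laceLoopA (l1 l2 : List Char) (k : Int) : List Char :=
  (PySem.List.pyRange 0 k 1).foldl
    (fun acc i => acc ++ [PySem.List.pyGetD l1 i ' ', PySem.List.pyGetD l2 i ' ']) []

def laceStrings (s1 : String) (s2 : String) : String :=
  let l1 := s1.toList
  let l2 := s2.toList
  if l1.length = l2.length then
    String.ofList (laceLoopA l1 l2 l1.length)
  else if l2.length < l1.length then
    String.ofList (laceLoopA l1 l2 l2.length ++ PySem.List.slice l1 (some (l2.length : Int)) none)
  else
    String.ofList (laceLoopA l1 l2 l1.length ++ PySem.List.slice l2 (some (l1.length : Int)) none)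

-- ===== PORT B =====
-- Source B's pick(k): the character at output position k, by index arithmetic
def lacePick (l1 l2 : List Char) (n1 n2 : Nat) (m : Nat) (k : Int) : Char :=
  if k < 2 * (m : Int) then
    if PySem.Int.mod k 2 = 0 then PySem.List.pyGetD l1 (PySem.Int.floordiv k 2) ' '
    else PySem.List.pyGetD l2 (PySem.Int.floordiv k 2) ' '
  else
    if n2 ≤ n1 then PySem.List.pyGetD l1 (k - (n2 : Int)) ' '
    else PySem.List.pyGetD l2 (k - (n1 : Int)) ' '

def laceStrings_alt (s1 : String) (s2 : String) : String :=
  let l1 := s1.toList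
  let l2 := s2.toList
  let n1 := l1.length
  let n2 := l2.length
  let m := if n1 < n2 then n1 else n2
  String.ofList ((PySem.List.pyRange 0 ((n1 + n2 : Nat) : Int) 1).map (lacePick l1 l2 n1 n2 m))

-- ===== PRECONDITION & SPEC =====
def Spec_laceStrings (s1 : String) (s2 : String) (out : String) : Prop := out = laceStrings_alt s1 s2
instance (s1 : String) (s2 : String) (out : String) : Decidable (Spec_laceStrings s1 s2 out) := by unfold Spec_laceStrings; infer_instance

-- ===== CLAIM (what is proved, stated in full; the proofs are below) =====
def Claim_equal_laceStrings : Prop := ∀ (s1 : String) (s2 : String), Dom_laceStrings s1 s2 → Spec_laceStrings s1 s2 (laceStrings s1 s2)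

-- ===== LEMMAS AND PROOFS =====

-- Nat-level version of Source B's pick
def lacePickN (l1 l2 : List Char) (n1 n2 m k : Nat) : Char :=
  if k < 2 * m then (if k % 2 = 0 then l1.getD (k / 2) ' ' else l2.getD (k / 2) ' ')
  else if n2 ≤ n1 then l1.getD (k - n2) ' ' else l2.getD (k - n1) ' '

theorem lacePick_natCast (l1 l2 : List Char) (n1 n2 m k : Nat) (hm : m = min n1 n2) :
    lacePick l1 l2 n1 n2 m (k : Int) = lacePickN l1 l2 n1 n2 m k := by
  unfold lacePick lacePickN
  have hmod : PySem.Int.mod (k : Int) 2 = ((k % 2 : Nat) : Int) := by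
    exact_mod_cast PySem.Int.mod_natCast k 2
  have hdiv : PySem.Int.floordiv (k : Int) 2 = ((k / 2 : Nat) : Int) := by
    exact_mod_cast PySem.Int.floordiv_natCast k 2
  by_cases h : k < 2 * m
  · rw [if_pos (by exact_mod_cast h), if_pos h, hmod, hdiv]
    by_cases he : k % 2 = 0
    · rw [if_pos (by exact_mod_cast he), if_pos he, PySem.List.pyGetD_natCast]
    · rw [if_neg (by exact_mod_cast he), if_neg he, PySem.List.pyGetD_natCast]
  · rw [if_neg (by exact_mod_cast h), if_neg h]
    by_cases hc : n2 ≤ n1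
    · rw [if_pos hc, if_pos hc, show (k : Int) - (n2 : Int) = ((k - n2 : Nat) : Int) by omega,
        PySem.List.pyGetD_natCast]
    · rw [if_neg hc, if_neg hc, show (k : Int) - (n1 : Int) = ((k - n1 : Nat) : Int) by omega,
        PySem.List.pyGetD_natCast]

-- within the interlaced zone, the position-indexed pick reproduces the pairwise flatMap
theorem map_range_pick_pairs (l1 l2 : List Char) (n1 n2 m : Nat) (j : Nat) (hj : j ≤ m) :
    (List.range (2 * j)).map (lacePickN l1 l2 n1 n2 m) =
      (List.range j).flatMap (fun i => [l1.getD i ' ', l2.getD i ' ']) := by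
  induction j with
  | zero => simp
  | succ j ih =>
    have h2 : 2 * (j + 1) = (2 * j + 1) + 1 := by omega
    rw [h2, List.range_succ, List.range_succ, List.map_append, List.map_append,
      ih (by omega), List.range_succ, List.flatMap_append]
    have hp1 : lacePickN l1 l2 n1 n2 m (2 * j) = l1.getD j ' ' := by
      unfold lacePickN
      rw [if_pos (by omega), if_pos (by omega), Nat.mul_div_cancel_left j (by norm_num)]
    have hp2 : lacePickN l1 l2 n1 n2 m (2 * j + 1) = l2.getD j ' ' := by
      unfold lacePickN
      rw [if_pos (by omega), if_neg (by omega), show (2 * j + 1) / 2 = j by omega]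
    simp [hp1, hp2]

-- reading a list tail position by position
theorem map_range_getD_drop (l : List Char) (m : Nat) :
    (List.range (l.length - m)).map (fun j => l.getD (m + j) ' ') = l.drop m := by
  apply List.ext_getElem
  · simp
  · intro i h1 h2
    simp only [List.getElem_map, List.getElem_range, List.getElem_drop]
    rw [List.getD_eq_getElem]

-- A's loop over range(k) equals the pairwise flatMap
theorem laceLoopA_eq (l1 l2 : List Char) (k : Nat) :
    laceLoopA l1 l2 (k : Int) = (List.range k).flatMap (fun i => [l1.getD i ' ', l2.getD i ' ']) := by
  unfold laceLoopA
  rw [PySem.List.foldl_append_eq_flatMap, PySem.List.pyRange_one 0 k]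
  simp [List.flatMap_map]

theorem laceStrings_spec_aux (s1 s2 : String) : laceStrings s1 s2 = laceStrings_alt s1 s2 := by
  simp only [laceStrings, laceStrings_alt]
  set l1 := s1.toList
  set l2 := s2.toList
  set n1 := l1.length with hn1
  set n2 := l2.length with hn2
  set m := if n1 < n2 then n1 else n2 with hm
  have hm1 : m ≤ n1 := by rw [hm]; split <;> omega
  have hm2 : m ≤ n2 := by rw [hm]; split <;> omega
  -- B's side: one map over all output positions = pairs ++ both tails
  have hB : (PySem.List.pyRange 0 ((n1 + n2 : Nat) : Int) 1).map (lacePick l1 l2 n1 n2 m) =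
      (List.range m).flatMap (fun i => [l1.getD i ' ', l2.getD i ' ']) ++ l1.drop m ++ l2.drop m := by
    rw [PySem.List.pyRange_one 0 ((n1 + n2 : Nat) : Int)]
    simp only [Int.sub_zero, Int.toNat_natCast, zero_add, List.map_map]
    have hfun : ((lacePick l1 l2 n1 n2 m) ∘ fun i : Nat => (i : Int)) = lacePickN l1 l2 n1 n2 m :=
      funext fun k => lacePick_natCast l1 l2 n1 n2 m k (by rw [hm]; split <;> omega)
    rw [hfun]
    rcases Nat.lt_or_ge n1 n2 with hc | hc
    · -- m = n1, tail comes from l2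
      have hmv : m = n1 := by rw [hm]; split <;> omega
      have hsplit : n1 + n2 = 2 * m + (n2 - m) := by omega
      rw [hsplit, List.range_add, List.map_append, List.map_map,
        map_range_pick_pairs l1 l2 n1 n2 m m le_rfl]
      have htail : ((lacePickN l1 l2 n1 n2 m) ∘ fun j : Nat => 2 * m + j) =
          (fun j => l2.getD (m + j) ' ') := by
        funext j
        simp only [Function.comp_apply]
        unfold lacePickN
        rw [if_neg (by omega), if_neg (by omega), show 2 * m + j - n1 = m + j by omega]
      rw [htail, show n2 - m = l2.length - m by omega, map_range_getD_drop l2 m,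
        show l1.drop m = [] from List.drop_of_length_le (by omega)]
      simp
    · -- m = n2, tail comes from l1
      have hmv : m = n2 := by rw [hm]; split <;> omega
      have hsplit : n1 + n2 = 2 * m + (n1 - m) := by omega
      rw [hsplit, List.range_add, List.map_append, List.map_map,
        map_range_pick_pairs l1 l2 n1 n2 m m le_rfl]
      have htail : ((lacePickN l1 l2 n1 n2 m) ∘ fun j : Nat => 2 * m + j) =
          (fun j => l1.getD (m + j) ' ') := by
        funext j
        simp only [Function.comp_apply]
        unfold lacePickN
        rw [if_neg (by omega), if_pos hc, show 2 * m + j - n2 = m + j by omega]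
      rw [htail, show n1 - m = l1.length - m by omega, map_range_getD_drop l1 m,
        show l2.drop m = [] from List.drop_of_length_le (by omega)]
      simp
  rw [hB]
  -- A's side: three branches, each reduced to the same canonical form
  rcases Nat.lt_trichotomy n1 n2 with h | h | h
  · rw [if_neg (by omega), if_neg (by omega), laceLoopA_eq,
      PySem.List.slice_from_natCast l2 n1]
    have hmv : m = n1 := by rw [hm]; split <;> omega
    rw [hmv]
    have h1 : l1.drop n1 = [] := List.drop_of_length_le (by omega)
    rw [h1]
    simp
  · rw [if_pos h, laceLoopA_eq]
    have hmv : m = n1 := by rw [hm]; split <;> omega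
    rw [hmv]
    have h1 : l1.drop n1 = [] := List.drop_of_length_le (by omega)
    have h2 : l2.drop n1 = [] := List.drop_of_length_le (by omega)
    rw [h1, h2]
    simp
  · rw [if_neg (by omega), if_pos h, laceLoopA_eq,
      PySem.List.slice_from_natCast l1 n2]
    have hmv : m = n2 := by rw [hm]; split <;> omega
    rw [hmv]
    have h2 : l2.drop n2 = [] := List.drop_of_length_le (by omega)
    rw [h2]
    simp

-- ===== VERDICT (by name: the statement is the Claim_ definition above) =====
theorem laceStrings_spec : Claim_equal_laceStrings := by
  intro s1 s2 _
  unfold Spec_laceStrings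
  exact laceStrings_spec_aux s1 s2
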